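-- pv_equiv track=rewrite | github.com/FanchenBao/leetcode | LeetCode_2105.py | minimumRefill
-- ===== SOURCE A (Python) =====
-- from typing import List
--
-- def minimumRefill(plants: List[int], capacityA: int, capacityB: int) -> int:
--     """Weird problem. Just follow the instruction.
--
--     1061 ms, faster than 77.33%
--     """
--     res = 0
--     i, j = 0, len(plants) - 1
--     a, b = capacityA, capacityB
--     while i < j:
--         if a < plants[i]:
--             a = capacityA
--             res += 1
--         a -= plants[i]
--         i += 1
--         if b < plants[j]:
--             b = capacityB
--             res += 1
--         b -= plants[j]
--         j -= 1
--     if i == j and ((a >= b and a < plants[i]) or (a < b and b < plants[j])):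
--         res += 1
--     return res
-- ===== SOURCE B (Python) =====
-- def _loads(seg, capacity):
--     """Greedily partition seg into maximal chunks a full can waters in a row;
--     return the list of chunk sums (the 'loads'). A new chunk starts exactly
--     when the water left in the can (capacity minus the current chunk's sum)
--     is not enough for the next plant."""
--     loads = [0]
--     for p in seg:
--         if capacity - loads[-1] < p:
--             loads.append(0)
--         loads[-1] += p
--     return loads
--
--
-- def minimumRefill(plants, capacityA, capacityB):
--     n = len(plants)
--     half = n // 2
--     la = _loads(plants[:half], capacityA)
--     lb = _loads(plants[n - half:][::-1], capacityB)
--     # each chunk after the first one costs exactly one refill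
--     refills = len(la) + len(lb) - 2
--     if n % 2 == 1:
--         m = plants[half]
--         a = capacityA - la[-1]
--         b = capacityB - lb[-1]
--         if (a >= b and a < m) or (a < b and b < m):
--             refills += 1
--     return refills
-- ===== Notes on version B (the rewrite author's own statement) =====
-- stated objective: alternative
-- what changed: Instead of interleaving two tank-and-counter simulations in one two-pointer loop, B greedily partitions each person's half into maximal full-can chunks, maintaining the list of chunk sums, and derives the answer structurally: refills = number of chunks minus one per person, remaining water = capacity minus the last chunk's sum, plus a separate middle-plant check when n is odd.
import Mathlib
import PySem

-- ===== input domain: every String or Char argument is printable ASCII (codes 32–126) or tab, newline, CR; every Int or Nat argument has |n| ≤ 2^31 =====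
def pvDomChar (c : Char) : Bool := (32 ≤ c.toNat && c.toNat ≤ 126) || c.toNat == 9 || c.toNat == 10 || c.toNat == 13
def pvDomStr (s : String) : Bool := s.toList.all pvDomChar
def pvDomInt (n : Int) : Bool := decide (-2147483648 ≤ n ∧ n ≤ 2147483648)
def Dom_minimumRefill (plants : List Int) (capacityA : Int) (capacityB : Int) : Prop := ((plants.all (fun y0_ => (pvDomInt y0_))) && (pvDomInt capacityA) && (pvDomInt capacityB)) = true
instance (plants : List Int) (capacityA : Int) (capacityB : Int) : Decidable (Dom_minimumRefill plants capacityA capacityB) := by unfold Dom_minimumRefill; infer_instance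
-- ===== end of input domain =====

-- B replaces A's interleaved two-tank simulation by greedy chunking: each half is partitioned into maximal full-can chunks (list of chunk sums); refills and remaining water are read off that structure (alternative decomposition, same cost).

-- ===== PORT A =====
-- A's while-loop; indices i, j are always in range when read, so pyGetD's default 0 is never used (totality only).
def minimumRefillLoop (plants : List Int) (capacityA : Int) (capacityB : Int)
    (i j a b res : Int) : Int :=
  if i < j then
    let pi := PySem.List.pyGetD plants i 0
    let ar := if a < pi then (capacityA, res + 1) else (a, res)
    let pj := PySem.List.pyGetD plants j 0
    let br := if b < pj then (capacityB, ar.2 + 1) else (b, ar.2)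
    minimumRefillLoop plants capacityA capacityB (i + 1) (j - 1) (ar.1 - pi) (br.1 - pj) br.2
  else if i = j ∧ ((a ≥ b ∧ a < PySem.List.pyGetD plants i 0) ∨ (a < b ∧ b < PySem.List.pyGetD plants j 0)) then
    res + 1
  else res
termination_by (j - i).toNat
decreasing_by omega

def minimumRefill (plants : List Int) (capacityA : Int) (capacityB : Int) : Int :=
  minimumRefillLoop plants capacityA capacityB 0 ((plants.length : Int) - 1) capacityA capacityB 0

-- ===== PORT B =====
-- one step of _loads: possibly open a new chunk (append 0), then add p to the last chunk
def loadsStep (capacity : Int) (loads : List Int) (p : Int) : List Int :=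
  let l := if capacity - loads.getLastD 0 < p then loads ++ [0] else loads
  l.dropLast ++ [l.getLastD 0 + p]

def loads (seg : List Int) (capacity : Int) : List Int :=
  seg.foldl (loadsStep capacity) [0]

def minimumRefill_alt (plants : List Int) (capacityA : Int) (capacityB : Int) : Int :=
  let n := plants.length
  let half := n / 2
  let la := loads (plants.take half) capacityA
  let lb := loads ((plants.drop (n - half)).reverse) capacityB
  -- each chunk after the first one costs exactly one refill
  let refills := (la.length : Int) + (lb.length : Int) - 2
  if n % 2 = 1 then
    let m := plants.getD half 0
    let a := capacityA - la.getLastD 0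
    let b := capacityB - lb.getLastD 0
    if (a ≥ b ∧ a < m) ∨ (a < b ∧ b < m) then refills + 1 else refills
  else refills

-- ===== PRECONDITION & SPEC =====
def Spec_minimumRefill (plants : List Int) (capacityA : Int) (capacityB : Int) (out : Int) : Prop := out = minimumRefill_alt plants capacityA capacityB
instance (plants : List Int) (capacityA : Int) (capacityB : Int) (out : Int) : Decidable (Spec_minimumRefill plants capacityA capacityB out) := by unfold Spec_minimumRefill; infer_instance

-- ===== CLAIM (what is proved, stated in full; the proofs are below) =====
def Claim_equal_minimumRefill : Prop := ∀ (plants : List Int) (capacityA : Int) (capacityB : Int), Dom_minimumRefill plants capacityA capacityB → Spec_minimumRefill plants capacityA capacityB (minimumRefill plants capacityA capacityB)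

-- ===== LEMMAS AND PROOFS =====

-- proof-side tank/counter view of one watering step (used to characterise A's loop)
def waterStep (capacity : Int) (s : Int × Int) (p : Int) : Int × Int :=
  let t := if s.1 < p then (capacity, s.2 + 1) else s
  (t.1 - p, t.2)

def water (seg : List Int) (capacity : Int) : Int × Int :=
  seg.foldl (waterStep capacity) (capacity, 0)

lemma waterStep_def (cap x r p : Int) :
    waterStep cap (x, r) p = (if x < p then cap - p else x - p, if x < p then r + 1 else r) := by
  simp only [waterStep]; split <;> rfl

lemma wfold_shift (cap : Int) (seg : List Int) (x r : Int) :
    seg.foldl (waterStep cap) (x, r)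
      = ((seg.foldl (waterStep cap) (x, 0)).1, r + (seg.foldl (waterStep cap) (x, 0)).2) := by
  induction seg generalizing x r with
  | nil => simp
  | cons p t ih =>
    simp only [List.foldl_cons, waterStep_def]
    rw [ih, ih (if x < p then cap - p else x - p) (if x < p then 0 + 1 else 0)]
    split <;> simp <;> ring

lemma wfold_one (cap : Int) (seg : List Int) (x : Int) :
    seg.foldl (waterStep cap) (x, 0 + 1)
      = ((seg.foldl (waterStep cap) (x, 0)).1, 1 + (seg.foldl (waterStep cap) (x, 0)).2) := by
  rw [wfold_shift]; norm_num

def midIf (plants : List Int) (idx x y : Int) : Int :=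
  if (x ≥ y ∧ x < PySem.List.pyGetD plants idx 0) ∨ (x < y ∧ y < PySem.List.pyGetD plants idx 0) then 1 else 0

lemma loop_eq (plants : List Int) (capA capB : Int) :
    ∀ (m : Nat) (i j a b res : Int), (j + 1 - i).toNat = m → 0 ≤ i → i ≤ j + 1 →
      i + j = (plants.length : Int) - 1 →
      minimumRefillLoop plants capA capB i j a b res =
        res + (((plants.drop i.toNat).take (m / 2)).foldl (waterStep capA) (a, 0)).2
            + (((((plants.drop (j + 1 - ((m / 2 : Nat) : Int)).toNat).take (m / 2)).reverse).foldl (waterStep capB) (b, 0)).2)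
            + (if m % 2 = 1 then
                 midIf plants (i + ((m / 2 : Nat) : Int))
                   ((((plants.drop i.toNat).take (m / 2)).foldl (waterStep capA) (a, 0)).1)
                   (((((plants.drop (j + 1 - ((m / 2 : Nat) : Int)).toNat).take (m / 2)).reverse).foldl (waterStep capB) (b, 0)).1)
               else 0) := by
  intro m
  induction m using Nat.strong_induction_on with
  | _ m IH =>
    match m with
    | 0 =>
      intro i j a b res hm h0 hij hsum
      have hij' : i = j + 1 := by omega
      rw [minimumRefillLoop]
      have h1 : ¬ i < j := by omega
      have h2 : ¬ i = j := by omega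
      simp [h1, h2]
    | 1 =>
      intro i j a b res hm h0 hij hsum
      have hij' : i = j := by omega
      subst hij'
      rw [minimumRefillLoop, if_neg (lt_irrefl i)]
      norm_num [midIf]
      split <;> simp
    | (k + 2) =>
      intro i j a b res hm h0 hij hsum
      have hilt : i < j := by omega
      have hin : i.toNat < plants.length := by omega
      have hjn : j.toNat < plants.length := by omega
      have hpi : PySem.List.pyGetD plants i 0 = plants[i.toNat] :=
        PySem.List.pyGetD_eq_getElem plants 0 h0 (by omega)
      have hpj : PySem.List.pyGetD plants j 0 = plants[j.toNat] :=
        PySem.List.pyGetD_eq_getElem plants 0 (by omega) (by omega)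
      have hh : (k + 2) / 2 = k / 2 + 1 := by omega
      have hmod : (k + 2) % 2 = k % 2 := by omega
      have hi1 : (i + 1).toNat = i.toNat + 1 := by omega
      have hdropA : plants.drop i.toNat = plants[i.toNat] :: plants.drop (i.toNat + 1) :=
        List.drop_eq_getElem_cons hin
      have hs : (j + 1 - ((k / 2 + 1 : Nat) : Int)).toNat + k / 2 = j.toNat := by push_cast; omega
      have heqs : ((j - 1) + 1 - ((k / 2 : Nat) : Int)).toNat = (j + 1 - ((k / 2 + 1 : Nat) : Int)).toNat := by
        push_cast; omega
      have hidx : (i + ((k / 2 + 1 : Nat) : Int)) = (i + 1 + ((k / 2 : Nat) : Int)) := by push_cast; ring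
      have htakeB : (plants.drop ((j + 1 - ((k / 2 + 1 : Nat) : Int)).toNat)).take (k / 2 + 1)
          = (plants.drop ((j + 1 - ((k / 2 + 1 : Nat) : Int)).toNat)).take (k / 2) ++ [plants[j.toNat]] := by
        rw [List.take_add_one, List.getElem?_drop, hs, List.getElem?_eq_getElem hjn]
        simp
      simp only [hh, hmod, hidx]
      rw [minimumRefillLoop, if_pos hilt]
      simp only [hpi, hpj]
      rw [IH k (by omega) (i + 1) (j - 1) _ _ _ (by omega) (by omega) (by omega) (by omega)]
      rw [hi1, heqs, hdropA, htakeB]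
      simp only [List.take_succ_cons, List.reverse_append, List.reverse_cons, List.reverse_nil,
        List.nil_append, List.singleton_append, List.foldl_cons, waterStep_def]
      by_cases ha : a < plants[i.toNat] <;> by_cases hb : b < plants[j.toNat] <;>
        simp only [ha, hb, ite_true, ite_false, wfold_one] <;> split <;> ring

-- the chunk list is never empty
lemma loadsStep_ne_nil (cap : Int) (l : List Int) (p : Int) : loadsStep cap l p ≠ [] := by
  simp [loadsStep]

-- correspondence: the tank/counter fold reads off the chunk-list fold
lemma water_of_loads (cap : Int) (seg : List Int) : ∀ (l : List Int) (r : Int), l ≠ [] →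
    seg.foldl (waterStep cap) (cap - l.getLastD 0, r)
      = (cap - (seg.foldl (loadsStep cap) l).getLastD 0,
         r + ((seg.foldl (loadsStep cap) l).length : Int) - (l.length : Int)) := by
  induction seg with
  | nil => intro l r _; simp
  | cons p t ih =>
    intro l r hl
    have hpos : 0 < l.length := List.length_pos_iff.mpr hl
    simp only [List.foldl_cons, waterStep_def]
    have hlast : (loadsStep cap l p).getLastD 0
        = (if cap - l.getLastD 0 < p then 0 else l.getLastD 0) + p := by
      simp only [loadsStep]; split <;> simp
    have hlen : ((loadsStep cap l p).length : Int)
        = (l.length : Int) + (if cap - l.getLastD 0 < p then 1 else 0) := by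
      simp only [loadsStep]; split <;> simp [List.length_dropLast] <;> push_cast <;> omega
    have htank : (if cap - l.getLastD 0 < p then cap - p else cap - l.getLastD 0 - p)
        = cap - (loadsStep cap l p).getLastD 0 := by
      rw [hlast]; split <;> ring
    rw [htank, ih (loadsStep cap l p) _ (loadsStep_ne_nil cap l p), Prod.mk.injEq]
    refine ⟨rfl, ?_⟩
    rw [hlen]; split <;> ring

lemma water_eq_loads (cap : Int) (seg : List Int) :
    water seg cap = (cap - (loads seg cap).getLastD 0, ((loads seg cap).length : Int) - 1) := by
  have := water_of_loads cap seg [0] 0 (by simp)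
  simpa [water, loads] using this

-- ===== VERDICT (by name: the statement is the Claim_ definition above) =====
theorem minimumRefill_spec : Claim_equal_minimumRefill := by
  intro plants capA capB _
  unfold Spec_minimumRefill minimumRefill minimumRefill_alt
  rw [loop_eq plants capA capB plants.length 0 ((plants.length : Int) - 1) capA capB 0
      (by omega) (by omega) (by omega) (by omega)]
  have hd : ((plants.length : Int) - 1 + 1 - ((plants.length / 2 : Nat) : Int)).toNat
      = plants.length - plants.length / 2 := by omega
  rw [hd]
  simp only [Int.toNat_zero, List.drop_zero]
  rw [List.take_of_length_le (l := List.drop (plants.length - plants.length / 2) plants)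
      (by rw [List.length_drop]; omega)]
  have hA := water_eq_loads capA (plants.take (plants.length / 2))
  have hB := water_eq_loads capB ((plants.drop (plants.length - plants.length / 2)).reverse)
  simp only [water] at hA hB
  rw [hA, hB]
  simp only [midIf, zero_add, PySem.List.pyGetD_natCast]
  split_ifs <;> simp_all <;> push_cast <;> ring
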